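-- pv_equiv track=rewrite | github.com/shivps20/logs-analyzer | data/parser.py | parse_openj9_thread_dump
-- ===== SOURCE A (Python) =====
-- def parse_openj9_thread_dump(content):
--     threads = []
--     current_thread = []
--     for line in content.splitlines():
--         if line.startswith('"') and current_thread:
--             threads.append(current_thread)
--             current_thread = []
--         current_thread.append(line)
--     if current_thread:
--         threads.append(current_thread)
--     return threads
-- ===== SOURCE B (Python) =====
-- def parse_openj9_thread_dump(content):
--     lines = content.splitlines()
--     n = len(lines)
--     out = []
--     start = 0
--     while start < n:
--         end = start + 1
--         while end < n and not lines[end].startswith('"'):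
--             end += 1
--         out.append(lines[start:end])
--         start = end
--     return out
-- ===== Notes on version B (the rewrite author's own statement) =====
-- stated objective: alternative
-- what changed: Replaces A's line-at-a-time scan with a current-block accumulator and end-of-loop flush by a two-level index loop that finds the end index of each block and slices the whole block out of the line list at once.
import Mathlib
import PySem

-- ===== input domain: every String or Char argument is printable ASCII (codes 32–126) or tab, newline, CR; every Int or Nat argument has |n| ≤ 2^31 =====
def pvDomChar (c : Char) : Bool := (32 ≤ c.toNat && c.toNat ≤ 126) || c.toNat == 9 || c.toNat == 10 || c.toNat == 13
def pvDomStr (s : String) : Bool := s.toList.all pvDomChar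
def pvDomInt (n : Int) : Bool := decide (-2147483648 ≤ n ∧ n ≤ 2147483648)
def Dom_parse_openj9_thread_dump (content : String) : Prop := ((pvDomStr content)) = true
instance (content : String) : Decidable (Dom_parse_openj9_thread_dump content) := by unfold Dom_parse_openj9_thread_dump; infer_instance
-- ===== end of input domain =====

-- B replaces A's line-at-a-time scan (current-block accumulator + final flush) by an index loop
-- that finds each block's end index and slices the block out whole; same cost, different decomposition.

-- ===== PORT A =====
-- the body of A's `for line in content.splitlines()` loop, on state (threads, current_thread)
def pvStepA (st : List (List String) × List String) (line : String) :
    List (List String) × List String :=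
  let st := if PySem.Str.startswith line "\"" && !st.2.isEmpty then
              (st.1 ++ [st.2], ([] : List String))
            else st
  (st.1, st.2 ++ [line])

def parse_openj9_thread_dump (content : String) : List (List String) :=
  let r := (PySem.Str.splitlines content).foldl pvStepA ([], [])
  if !r.2.isEmpty then r.1 ++ [r.2] else r.1

-- ===== PORT B =====
-- the inner `while end < n and not lines[end].startswith('"')` loop of Source B
def pvFindEnd (lines : List String) (j : Nat) : Nat :=
  if h : j < lines.length then
    if !PySem.Str.startswith lines[j] "\"" then pvFindEnd lines (j + 1) else j
  else j
termination_by lines.length - j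

-- the inner loop never moves the index backwards (needed for the outer loop's termination)
theorem pvFindEnd_le (lines : List String) (j : Nat) : j ≤ pvFindEnd lines j := by
  fun_induction pvFindEnd lines j with
  | case1 j h hq ih => omega
  | case2 j h hq => omega
  | case3 j h => omega

-- the outer `while start < n` loop of Source B, accumulating `out`
def pvOuter (lines : List String) (start : Nat) (out : List (List String)) : List (List String) :=
  if _h : start < lines.length then
    let e := pvFindEnd lines (start + 1)
    pvOuter lines e (out ++ [PySem.List.slice lines (some (start : Int)) (some (e : Int))])
  else out
termination_by lines.length - start
decreasing_by
  have := pvFindEnd_le lines (start + 1)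
  omega

def parse_openj9_thread_dump_alt (content : String) : List (List String) :=
  pvOuter (PySem.Str.splitlines content) 0 []

-- ===== PRECONDITION & SPEC =====
def Spec_parse_openj9_thread_dump (content : String) (out : List (List String)) : Prop := out = parse_openj9_thread_dump_alt content
instance (content : String) (out : List (List String)) : Decidable (Spec_parse_openj9_thread_dump content out) := by unfold Spec_parse_openj9_thread_dump; infer_instance

-- ===== CLAIM (what is proved, stated in full; the proofs are below) =====
def Claim_equal_parse_openj9_thread_dump : Prop := ∀ (content : String), Dom_parse_openj9_thread_dump content → Spec_parse_openj9_thread_dump content (parse_openj9_thread_dump content)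

-- ===== LEMMAS AND PROOFS =====

-- "is a quote line" predicate, shared by the proof layer
def pvQ (x : String) : Bool := PySem.Str.startswith x "\""

-- reference grouping: a block is a line followed by the non-quote lines after it
def pvRef (lines : List String) : List (List String) :=
  match lines with
  | [] => []
  | l :: rest =>
    (l :: rest.takeWhile (fun x => !pvQ x)) :: pvRef (rest.dropWhile (fun x => !pvQ x))
termination_by lines.length
decreasing_by
  have := List.length_dropWhile_le (fun x => !pvQ x) rest
  simp only [List.length_cons]
  omega

theorem pvTake_takeWhileLen {α : Type} (p : α → Bool) (xs : List α) :
    xs.take (xs.takeWhile p).length = xs.takeWhile p := by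
  induction xs with
  | nil => simp
  | cons x xs ih =>
    by_cases h : p x = true <;> simp [h, ih]

theorem pvDrop_takeWhileLen {α : Type} (p : α → Bool) (xs : List α) :
    xs.drop (xs.takeWhile p).length = xs.dropWhile p := by
  induction xs with
  | nil => simp
  | cons x xs ih =>
    by_cases h : p x = true <;> simp [h, ih]

theorem pvFindEnd_eq (lines : List String) (j : Nat) (hj : j ≤ lines.length) :
    pvFindEnd lines j = j + ((lines.drop j).takeWhile (fun x => !pvQ x)).length := by
  fun_induction pvFindEnd lines j with
  | case1 j h hq ih =>
    have hdrop : lines.drop j = lines[j] :: lines.drop (j + 1) :=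
      List.drop_eq_getElem_cons h
    rw [ih (by omega), hdrop, List.takeWhile_cons,
        show (!pvQ lines[j]) = true from hq]
    simp only [if_true, List.length_cons]
    omega
  | case2 j h hq =>
    have hdrop : lines.drop j = lines[j] :: lines.drop (j + 1) :=
      List.drop_eq_getElem_cons h
    rw [hdrop, List.takeWhile_cons,
        show (!pvQ lines[j]) = false by simpa [pvQ] using hq]
    simp
  | case3 j h =>
    have : lines.drop j = [] := List.drop_eq_nil_of_le (by omega)
    simp [this]

theorem pvOuter_eq (lines : List String) (start : Nat) (out : List (List String)) :
    pvOuter lines start out = out ++ pvRef (lines.drop start) := by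
  fun_induction pvOuter lines start out with
  | case1 start out h e ih =>
    have hs1 : start + 1 ≤ lines.length := by omega
    have he : e = start + 1 + ((lines.drop (start + 1)).takeWhile (fun x => !pvQ x)).length :=
      pvFindEnd_eq lines (start + 1) hs1
    have hdrop : lines.drop start = lines[start] :: lines.drop (start + 1) :=
      List.drop_eq_getElem_cons h
    have hslice : PySem.List.slice lines (some (start : Int)) (some (e : Int))
        = lines[start] :: (lines.drop (start + 1)).takeWhile (fun x => !pvQ x) := by
      rw [PySem.List.slice_natCast, hdrop, he,
          show start + 1 + ((lines.drop (start + 1)).takeWhile (fun x => !pvQ x)).length - start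
             = ((lines.drop (start + 1)).takeWhile (fun x => !pvQ x)).length + 1 by omega,
          List.take_succ_cons, pvTake_takeWhileLen]
    have hdropE : lines.drop e = (lines.drop (start + 1)).dropWhile (fun x => !pvQ x) := by
      have h2 : (lines.drop (start + 1)).drop
            ((lines.drop (start + 1)).takeWhile (fun x => !pvQ x)).length
          = lines.drop e := by
        rw [List.drop_drop, he]
      rw [← h2]
      exact pvDrop_takeWhileLen _ _
    rw [ih, hslice, hdropE, hdrop, pvRef]
    simp
  | case2 start out h =>
    have : lines.drop start = [] := List.drop_eq_nil_of_le (by omega)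
    rw [this, pvRef]
    simp

theorem pvStepA_quote (st : List (List String) × List String) (line : String)
    (hq : pvQ line = true) (hc : st.2 ≠ []) :
    pvStepA st line = (st.1 ++ [st.2], [line]) := by
  simp [pvStepA, pvQ] at hq ⊢
  simp [hq, hc]

theorem pvStepA_noquote (st : List (List String) × List String) (line : String)
    (hq : pvQ line = false) :
    pvStepA st line = (st.1, st.2 ++ [line]) := by
  simp [pvStepA, pvQ] at hq ⊢
  simp [hq]

theorem pvStepA_emptycur (acc : List (List String)) (line : String) :
    pvStepA (acc, []) line = (acc, [line]) := by
  simp [pvStepA]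

-- A's fold with a nonempty current block yields: the current block extended by the
-- following non-quote lines, then the reference grouping of the remainder.
theorem pvFoldA (xs : List String) (acc : List (List String)) (cur : List String)
    (hcur : cur ≠ []) :
    (let r := xs.foldl pvStepA (acc, cur)
      if !r.2.isEmpty then r.1 ++ [r.2] else r.1)
    = acc ++ ((cur ++ xs.takeWhile (fun x => !pvQ x)) ::
        pvRef (xs.dropWhile (fun x => !pvQ x))) := by
  induction xs generalizing acc cur with
  | nil =>
    simp only [List.foldl_nil, List.takeWhile_nil, List.dropWhile_nil, List.append_nil]
    rw [show pvRef ([] : List String) = [] from by rw [pvRef]]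
    simp [hcur]
  | cons x xs ih =>
    cases hq : pvQ x with
    | true =>
      rw [List.foldl_cons, pvStepA_quote (acc, cur) x hq hcur,
          ih (acc ++ [cur]) [x] (by simp),
          List.takeWhile_cons, List.dropWhile_cons]
      simp only [hq, Bool.not_true, Bool.false_eq_true, ite_false]
      rw [pvRef]
      simp
    | false =>
      rw [List.foldl_cons, pvStepA_noquote (acc, cur) x hq,
          ih acc (cur ++ [x]) (by simp),
          List.takeWhile_cons, List.dropWhile_cons]
      simp [hq]

-- ===== VERDICT (by name: the statement is the Claim_ definition above) =====
theorem parse_openj9_thread_dump_spec : Claim_equal_parse_openj9_thread_dump := by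
  intro content _
  unfold Spec_parse_openj9_thread_dump parse_openj9_thread_dump parse_openj9_thread_dump_alt
  rw [pvOuter_eq]
  simp only [List.nil_append, List.drop_zero]
  cases hls : PySem.Str.splitlines content with
  | nil =>
    rw [pvRef]
    simp
  | cons l rest =>
    rw [List.foldl_cons, pvStepA_emptycur [] l, pvFoldA rest [] [l] (by simp), pvRef]
    simp
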